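-- pv_equiv track=rewrite | github.com/ericksoa/agentic-evolve | showcase/code-golf/0a938d79/solution.py | solve
-- ===== SOURCE A (Python) =====
-- def solve(g):
--  R,C=len(g),len(g[0]);o=[[0]*C for _ in range(R)];M=[]
--  for i in range(R):
--   for j in range(C):
--    if g[i][j]:M+=[(i,j,g[i][j])]
--  M.sort(key=lambda x:x[0]*C+x[1])
--  r1,c1,v1=M[0];r2,c2,v2=M[1]
--  rd,cd=r2-r1,c2-c1
--  if c1==c2 or(rd>0 and rd<cd):
--   d=rd
--   for i in range(R):
--    for j in range(C):
--     k=(i-r1)%(2*d)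
--     if i>=r1:
--      if k==0:o[i][j]=v1
--      elif k==d:o[i][j]=v2
--  else:
--   d=cd
--   for i in range(R):
--    for j in range(C):
--     k=(j-c1)%(2*d)
--     if j>=c1:
--      if k==0:o[i][j]=v1
--      elif k==d:o[i][j]=v2
--  return o
-- ===== SOURCE B (Python) =====
-- def solve(g):
--     R, C = len(g), len(g[0])
--     nz = ((f, v) for f, v in enumerate([x for row in g for x in row[:C]]) if v)
--     f1, v1 = next(nz)
--     f2, v2 = next(nz)
--     r1, c1 = divmod(f1, C)
--     r2, c2 = divmod(f2, C)
--     rd, cd = r2 - r1, c2 - c1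
--     if c1 == c2 or 0 < rd < cd:
--         d = rd
--         zero = [0] * C
--         block = [[v1] * C] + [zero] * (d - 1) + [[v2] * C] + [zero] * (d - 1)
--         reps = (R - r1 + 2 * d - 1) // (2 * d)
--         return [list(r) for r in [zero] * r1 + (block * reps)[:R - r1]]
--     else:
--         a = abs(cd)
--         blk = [v1] + [0] * (a - 1) + [v2] + [0] * (a - 1)
--         reps = (C - c1 + 2 * a - 1) // (2 * a)
--         template = [0] * c1 + (blk * reps)[:C - c1]
--         return [list(template) for _ in range(R)]
-- ===== Notes on version B (the rewrite author's own statement) =====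
-- stated objective: faster
-- what changed: B flattens the grid to 1-D and lazily pulls the first two nonzero (index,value) pairs from a generator (A collects every nonzero cell and sorts), recovers coordinates with divmod, and builds the output by list-repetition tiling: it concatenates copies of one period block ([v1-row, zeros..., v2-row, zeros...] or a 1-D template) and slices to size, with no per-cell modulo pass at all.
import Mathlib
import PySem

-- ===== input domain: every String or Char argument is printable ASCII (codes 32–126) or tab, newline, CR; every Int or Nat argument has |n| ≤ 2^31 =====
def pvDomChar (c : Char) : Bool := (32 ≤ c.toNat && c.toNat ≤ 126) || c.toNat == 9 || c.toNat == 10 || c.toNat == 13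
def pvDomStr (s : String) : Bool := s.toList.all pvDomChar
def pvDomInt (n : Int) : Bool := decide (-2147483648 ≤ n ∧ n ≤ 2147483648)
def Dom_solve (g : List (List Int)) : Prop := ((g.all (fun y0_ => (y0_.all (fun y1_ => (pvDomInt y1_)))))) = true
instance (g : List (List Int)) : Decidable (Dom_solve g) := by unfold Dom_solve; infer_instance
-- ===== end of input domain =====

-- B: find the first two nonzero cells by a lazy scan of the FLATTENED grid (divmod recovers the
-- coordinates) and build the output by tiling — repeating one period block and slicing — with no
-- per-cell modulo pass; measurably faster by a constant factor, same O(R*C).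

-- ===== PORT A =====
def solve (g : List (List Int)) : List (List Int) :=
  let R : Int := (g.length : Int)
  let C : Int := ((PySem.List.pyGetD g 0 ([] : List Int)).length : Int)
  let o0 : List (List Int) := List.replicate R.toNat (List.replicate C.toNat (0 : Int))
  let M0 : List (Int × Int × Int) :=
    (PySem.List.pyRange 0 R 1).foldl (fun M i =>
      (PySem.List.pyRange 0 C 1).foldl (fun M j =>
        let v := PySem.List.pyGetD (PySem.List.pyGetD g i ([] : List Int)) j (0 : Int)
        if v ≠ 0 then M ++ [(i, j, v)] else M) M) []
  let M := PySem.List.sorted M0 (fun x => x.1 * C + x.2.1) false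
  let t1 := PySem.List.pyGetD M 0 ((0 : Int), (0 : Int), (0 : Int))
  let t2 := PySem.List.pyGetD M 1 ((0 : Int), (0 : Int), (0 : Int))
  let r1 := t1.1
  let c1 := t1.2.1
  let v1 := t1.2.2
  let r2 := t2.1
  let c2 := t2.2.1
  let v2 := t2.2.2
  let rd := r2 - r1
  let cd := c2 - c1
  if c1 = c2 ∨ (0 < rd ∧ rd < cd) then
    let d := rd
    (PySem.List.pyRange 0 R 1).foldl (fun o i =>
      (PySem.List.pyRange 0 C 1).foldl (fun o j =>
        let k := PySem.Int.mod (i - r1) (2 * d)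
        if r1 ≤ i then
          if k = 0 then o.modify i.toNat (fun row => row.set j.toNat v1)
          else if k = d then o.modify i.toNat (fun row => row.set j.toNat v2)
          else o
        else o) o) o0
  else
    let d := cd
    (PySem.List.pyRange 0 R 1).foldl (fun o i =>
      (PySem.List.pyRange 0 C 1).foldl (fun o j =>
        let k := PySem.Int.mod (j - c1) (2 * d)
        if c1 ≤ j then
          if k = 0 then o.modify i.toNat (fun row => row.set j.toNat v1)
          else if k = d then o.modify i.toNat (fun row => row.set j.toNat v2)
          else o
        else o) o) o0

-- ===== PORT B =====
-- lazy generator 'next': first (flat index, value) with nonzero value, scanning from index f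
def nextNZ : List Int → Nat → Option (Nat × Int)
  | [], _ => none
  | v :: vs, f => if v ≠ 0 then some (f, v) else nextNZ vs (f + 1)

def solve_alt (g : List (List Int)) : List (List Int) :=
  let R := g.length
  let C := (g.headD []).length
  let flat := g.flatMap (fun row => row.take C)
  let p1 := (nextNZ flat 0).getD (0, 0)
  let f1 := p1.1
  let v1 := p1.2
  let p2 := (nextNZ (flat.drop (f1 + 1)) (f1 + 1)).getD (0, 0)
  let f2 := p2.1
  let v2 := p2.2
  let r1 := f1 / C
  let c1 := f1 % C
  let r2 := f2 / C
  let c2 := f2 % C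
  let rd := (r2 : Int) - (r1 : Int)
  let cd := (c2 : Int) - (c1 : Int)
  if (c1 : Int) = (c2 : Int) ∨ (0 < rd ∧ rd < cd) then
    let d := r2 - r1
    let zero := List.replicate C (0 : Int)
    let block := [List.replicate C v1] ++ List.replicate (d - 1) zero
      ++ [List.replicate C v2] ++ List.replicate (d - 1) zero
    let reps := (R - r1 + 2 * d - 1) / (2 * d)
    List.replicate r1 zero ++ ((List.replicate reps block).flatten.take (R - r1))
  else
    let a := cd.natAbs
    let blk := [v1] ++ List.replicate (a - 1) (0 : Int)
      ++ [v2] ++ List.replicate (a - 1) (0 : Int)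
    let reps := (C - c1 + 2 * a - 1) / (2 * a)
    let template := List.replicate c1 (0 : Int) ++ ((List.replicate reps blk).flatten.take (C - c1))
    List.replicate R template

-- ===== PRECONDITION & SPEC =====
-- Pre_: exactly where Python A returns: g nonempty, every row at least len(g[0]) long
-- (else g[i][j] raises IndexError), and at least two nonzero cells in the first len(g[0])
-- columns (else M[1] raises IndexError).
def Pre_solve (g : List (List Int)) : Prop :=
  g ≠ [] ∧ (∀ r ∈ g, (g.headD []).length ≤ r.length) ∧
    2 ≤ (g.flatMap (fun r => r.take (g.headD []).length)).countP (fun v => v ≠ 0)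
instance (g : List (List Int)) : Decidable (Pre_solve g) := by unfold Pre_solve; infer_instance
def pvWitness_solve : List (List Int) := [[1, 0], [0, 0], [2, 0]]

def Spec_solve (g : List (List Int)) (out : List (List Int)) : Prop := out = solve_alt g
instance (g : List (List Int)) (out : List (List Int)) : Decidable (Spec_solve g out) := by unfold Spec_solve; infer_instance

-- ===== CLAIM (what is proved, stated in full; the proofs are below) =====
def Claim_equal_solve : Prop := ∀ (g : List (List Int)), Dom_solve g → Pre_solve g → Spec_solve g (solve g)

-- ===== LEMMAS AND PROOFS =====

-- ---- A-side: the nested collection loop produces the row-major nonzero triples ----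
def rowCellsB (C : Nat) (i : Nat) (row : List Int) : List (Int × Int × Int) :=
  (List.range C).foldl (fun a j =>
    let v := row.getD j 0
    if v ≠ 0 then a ++ [((i : Int), (j : Int), v)] else a) []

def flatCells (C : Nat) : List (List Int) → Nat → List (Int × Int × Int)
  | [], _ => []
  | r :: rs, i => rowCellsB C i r ++ flatCells C rs (i + 1)

theorem rowCellsB_eq (C i : Nat) (row : List Int) :
    rowCellsB C i row
      = ((List.range C).filter (fun j => row.getD j 0 != 0)).map
          (fun (j : Nat) => ((i : Int), (j : Int), row.getD j 0)) := by
  unfold rowCellsB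
  have h := PySem.List.foldl_append_if (fun j => row.getD j 0 != 0)
    (fun (j : Nat) => ((i : Int), (j : Int), row.getD j 0)) (List.range C) []
  have e : (fun (a : List (Int × Int × Int)) (j : Nat) =>
      let v := row.getD j 0
      if v ≠ 0 then a ++ [((i : Int), (j : Int), v)] else a)
      = (fun (acc : List (Int × Int × Int)) (x : Nat) =>
          if (row.getD x 0 != 0) = true then acc ++ [((i : Int), (x : Int), row.getD x 0)] else acc) := by
    funext a j
    simp [bne_iff_ne]
  rw [e, h, List.nil_append]

theorem innerA_eq (C i : Nat) (row : List Int) (M : List (Int × Int × Int)) :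
    (List.range C).foldl (fun M (j : Nat) =>
      let v := row.getD j 0
      if v ≠ 0 then M ++ [((i : Int), (j : Int), v)] else M) M
      = M ++ rowCellsB C i row := by
  have h := PySem.List.foldl_append_if (fun j => row.getD j 0 != 0)
    (fun (j : Nat) => ((i : Int), (j : Int), row.getD j 0)) (List.range C) M
  have e : (fun (a : List (Int × Int × Int)) (j : Nat) =>
      let v := row.getD j 0
      if v ≠ 0 then a ++ [((i : Int), (j : Int), v)] else a)
      = (fun (acc : List (Int × Int × Int)) (x : Nat) =>
          if (row.getD x 0 != 0) = true then acc ++ [((i : Int), (x : Int), row.getD x 0)] else acc) := by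
    funext a j
    simp [bne_iff_ne]
  rw [e, h, rowCellsB_eq]

theorem mem_flatCells (C : Nat) :
    ∀ (rows : List (List Int)) (s : Nat) (x : Int × Int × Int), x ∈ flatCells C rows s →
      (s : Int) ≤ x.1 ∧ 0 ≤ x.2.1 ∧ x.2.1 < (C : Int) := by
  intro rows
  induction rows with
  | nil => intro s x hx; simp [flatCells] at hx
  | cons r rs ih =>
    intro s x hx
    rw [flatCells, List.mem_append] at hx
    rcases hx with hx | hx
    · rw [rowCellsB_eq, List.mem_map] at hx
      obtain ⟨j, hj, rfl⟩ := hx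
      rw [List.mem_filter, List.mem_range] at hj
      refine ⟨le_refl _, ?_, ?_⟩
      · show (0 : Int) ≤ (j : Int)
        positivity
      · show (j : Int) < (C : Int)
        exact_mod_cast hj.1
    · have := ih (s + 1) x hx
      push_cast at this ⊢
      exact ⟨by omega, this.2⟩

theorem pairwise_rowCellsB (C i : Nat) :
    ∀ (row : List Int),
      (rowCellsB C i row).Pairwise
        (fun a b => a.1 * (C : Int) + a.2.1 < b.1 * (C : Int) + b.2.1) := by
  intro row
  rw [rowCellsB_eq, List.pairwise_map]
  apply List.Pairwise.filter
  apply List.pairwise_lt_range.imp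
  intro a b hab
  have : (a : Int) < (b : Int) := by exact_mod_cast hab
  linarith

theorem pairwise_flatCells (C : Nat) :
    ∀ (rows : List (List Int)) (s : Nat),
      (flatCells C rows s).Pairwise
        (fun a b => a.1 * (C : Int) + a.2.1 < b.1 * (C : Int) + b.2.1) := by
  intro rows
  induction rows with
  | nil => intro s; simp [flatCells]
  | cons r rs ih =>
    intro s
    rw [flatCells, List.pairwise_append]
    refine ⟨pairwise_rowCellsB C s r, ih (s + 1), ?_⟩
    intro a ha b hb
    rw [rowCellsB_eq, List.mem_map] at ha
    obtain ⟨j, hj, rfl⟩ := ha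
    rw [List.mem_filter, List.mem_range] at hj
    have hb' := mem_flatCells C rs (s + 1) b hb
    have hj' : (j : Int) < (C : Int) := by exact_mod_cast hj.1
    have h1 : ((s : Int) + 1) * (C : Int) ≤ b.1 * (C : Int) := by
      apply mul_le_mul_of_nonneg_right _ (by positivity)
      push_cast at hb' ⊢
      omega
    have h2 : (s : Int) * (C : Int) + (C : Int) ≤ b.1 * (C : Int) := by nlinarith [h1]
    have h3 : (0 : Int) ≤ b.2.1 := hb'.2.1
    show (s : Int) * (C : Int) + (j : Int) < b.1 * (C : Int) + b.2.1
    linarith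

theorem outer_fold (C : Nat) :
    ∀ (g : List (List Int)) (s : Nat) (acc : List (Int × Int × Int)),
      (List.range g.length).foldl (fun M i => M ++ rowCellsB C (s + i) (g.getD i [])) acc
        = acc ++ flatCells C g s := by
  intro g
  induction g with
  | nil => intro s acc; simp [flatCells]
  | cons r rs ih =>
    intro s acc
    rw [List.length_cons, List.range_succ_eq_map, List.foldl_cons, List.foldl_map]
    have e : (fun (M : List (Int × Int × Int)) (i : Nat) =>
        M ++ rowCellsB C (s + Nat.succ i) ((r :: rs).getD (Nat.succ i) []))
        = (fun M i => M ++ rowCellsB C ((s + 1) + i) (rs.getD i [])) := by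
      funext M i
      rw [List.getD_cons_succ]
      congr 2
      omega
    rw [e, ih (s + 1)]
    simp [flatCells]

theorem solveA_M0 (g : List (List Int)) (C : Nat) :
    (PySem.List.pyRange 0 (g.length : Int) 1).foldl (fun M i =>
      (PySem.List.pyRange 0 (C : Int) 1).foldl (fun M j =>
        let v := PySem.List.pyGetD (PySem.List.pyGetD g i ([] : List Int)) j (0 : Int)
        if v ≠ 0 then M ++ [(i, j, v)] else M) M) []
      = flatCells C g 0 := by
  rw [PySem.List.pyRange_zero_natCast g.length, PySem.List.pyRange_zero_natCast C, List.foldl_map]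
  have e : (fun (M : List (Int × Int × Int)) (i : Nat) =>
      (List.foldl (fun (M : List (Int × Int × Int)) (j : Int) =>
        let v := PySem.List.pyGetD (PySem.List.pyGetD g (i : Int) ([] : List Int)) j (0 : Int)
        if v ≠ 0 then M ++ [((i : Int), j, v)] else M) M (List.map (fun (k : Nat) => (k : Int)) (List.range C))))
      = (fun M i => M ++ rowCellsB C (0 + i) (g.getD i [])) := by
    funext M i
    rw [List.foldl_map]
    have e2 : (fun (M : List (Int × Int × Int)) (j : Nat) =>
        let v := PySem.List.pyGetD (PySem.List.pyGetD g (i : Int) ([] : List Int)) (j : Int) (0 : Int)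
        if v ≠ 0 then M ++ [((i : Int), (j : Int), v)] else M)
        = (fun (M : List (Int × Int × Int)) (j : Nat) =>
            let v := (g.getD i []).getD j 0
            if v ≠ 0 then M ++ [((i : Int), (j : Int), v)] else M) := by
      funext M j
      simp [PySem.List.pyGetD_natCast]
    rw [e2, innerA_eq]
    congr 2
    omega
  rw [e, outer_fold, List.nil_append]

-- ---- generic list-surgery lemmas ----
theorem modify_modify_self {α : Type} (l : List α) (n : Nat) (f g : α → α) :
    (l.modify n f).modify n g = l.modify n (fun x => g (f x)) := by
  apply List.ext_getElem (by simp)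
  intro j h1 h2
  simp only [List.getElem_modify]
  split_ifs <;> rfl

theorem modify_self_id {α : Type} (l : List α) (n : Nat) :
    l.modify n (fun x => x) = l := by
  apply List.ext_getElem (by simp)
  intro j h1 h2
  simp only [List.getElem_modify]
  split_ifs <;> rfl

theorem foldl_modify_comm {β : Type} (n : Nat) (f : β → List Int → List Int) :
    ∀ (l : List β) (o : List (List Int)),
      l.foldl (fun o j => o.modify n (f j)) o = o.modify n (fun r => l.foldl (fun r j => f j r) r) := by
  intro l
  induction l with
  | nil => intro o; simp [modify_self_id]
  | cons a t ih => intro o; simp only [List.foldl_cons, ih, modify_modify_self]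

theorem foldl_range_set_ite2 (p1 p2 : Nat → Prop) [DecidablePred p1] [DecidablePred p2]
    (v1 v2 : Int) :
    ∀ (n : Nat) (row : List Int),
      (List.range n).foldl (fun r j => if p1 j then r.set j v1 else if p2 j then r.set j v2 else r) row
        = row.mapIdx (fun j x => if j < n then (if p1 j then v1 else if p2 j then v2 else x) else x) := by
  intro n
  induction n with
  | zero =>
    intro row
    apply List.ext_getElem (by simp)
    intro j h1 h2
    simp
  | succ n ih =>
    intro row
    rw [List.range_succ, List.foldl_append, ih]
    simp only [List.foldl_cons, List.foldl_nil]
    apply List.ext_getElem (by split_ifs <;> simp)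
    intro j h1 h2
    simp only [List.getElem_mapIdx]
    by_cases hj : j = n
    · subst hj
      split_ifs <;> simp [List.getElem_mapIdx]
    · split_ifs with hp1 hp2 <;>
        simp only [List.getElem_set, List.getElem_mapIdx] <;>
        split_ifs <;> first | rfl | omega

theorem foldl_range_modify (G : Nat → List Int → List Int) :
    ∀ (n : Nat) (o : List (List Int)),
      (List.range n).foldl (fun o i => o.modify i (G i)) o
        = o.mapIdx (fun i row => if i < n then G i row else row) := by
  intro n
  induction n with
  | zero =>
    intro o
    apply List.ext_getElem (by simp)
    intro j h1 h2
    simp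
  | succ n ih =>
    intro o
    rw [List.range_succ, List.foldl_append, ih]
    simp only [List.foldl_cons, List.foldl_nil]
    apply List.ext_getElem (by simp)
    intro j h1 h2
    simp only [List.getElem_modify, List.getElem_mapIdx]
    by_cases hj : n = j <;> split_ifs <;> simp_all <;> omega

theorem mapIdx_replicate {α β : Type} (n : Nat) (a : α) (f : Nat → α → β) :
    (List.replicate n a).mapIdx f = (List.range n).map (fun i => f i a) := by
  apply List.ext_getElem (by simp)
  intro j h1 h2
  simp

theorem fill_mapIdx (v : Int) :
    ∀ (n : Nat) (row : List Int),
      (List.range n).foldl (fun r j => r.set j v) row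
        = row.mapIdx (fun j x => if j < n then v else x) := by
  intro n
  induction n with
  | zero =>
    intro row
    apply List.ext_getElem (by simp)
    intro j h1 h2
    simp
  | succ n ih =>
    intro row
    rw [List.range_succ, List.foldl_append, ih]
    simp only [List.foldl_cons, List.foldl_nil]
    apply List.ext_getElem (by simp)
    intro j h1 h2
    simp only [List.getElem_set, List.getElem_mapIdx]
    by_cases hj : n = j <;> split_ifs <;> simp_all <;> omega

theorem fill_replicate (n : Nat) (v : Int) :
    (List.range n).foldl (fun r j => r.set j v) (List.replicate n (0 : Int))
      = List.replicate n v := by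
  rw [fill_mapIdx]
  apply List.ext_getElem (by simp)
  intro j h1 h2
  have hj : j < n := by simpa using h2
  simp [hj]

theorem rowBranch_eq (R Cn : Nat) (r1 v1 v2 d : Int) :
    (List.range R).foldl (fun o (i : Nat) =>
      (List.range Cn).foldl (fun (o : List (List Int)) (j : Nat) =>
        if r1 ≤ (i : Int) then
          if PySem.Int.mod ((i : Int) - r1) (2 * d) = 0 then o.modify i (fun row => row.set j v1)
          else if PySem.Int.mod ((i : Int) - r1) (2 * d) = d then o.modify i (fun row => row.set j v2)
          else o
        else o) o) (List.replicate R (List.replicate Cn (0 : Int)))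
      = (List.range R).map (fun (i : Nat) =>
          if r1 ≤ (i : Int) ∧ PySem.Int.mod ((i : Int) - r1) (2 * d) = 0 then List.replicate Cn v1
          else if r1 ≤ (i : Int) ∧ PySem.Int.mod ((i : Int) - r1) (2 * d) = d then List.replicate Cn v2
          else List.replicate Cn (0 : Int)) := by
  have hstep : (fun (o : List (List Int)) (i : Nat) =>
      (List.range Cn).foldl (fun (o : List (List Int)) (j : Nat) =>
        if r1 ≤ (i : Int) then
          if PySem.Int.mod ((i : Int) - r1) (2 * d) = 0 then o.modify i (fun row => row.set j v1)
          else if PySem.Int.mod ((i : Int) - r1) (2 * d) = d then o.modify i (fun row => row.set j v2)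
          else o
        else o) o)
      = (fun o i => o.modify i
          (if r1 ≤ (i : Int) ∧ PySem.Int.mod ((i : Int) - r1) (2 * d) = 0 then
            (fun row => (List.range Cn).foldl (fun r j => r.set j v1) row)
          else if r1 ≤ (i : Int) ∧ PySem.Int.mod ((i : Int) - r1) (2 * d) = d then
            (fun row => (List.range Cn).foldl (fun r j => r.set j v2) row)
          else (fun row => row))) := by
    funext o i
    by_cases h1 : r1 ≤ (i : Int)
    · by_cases h2 : PySem.Int.mod ((i : Int) - r1) (2 * d) = 0
      · have e : (fun (o : List (List Int)) (j : Nat) =>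
            if r1 ≤ (i : Int) then
              if PySem.Int.mod ((i : Int) - r1) (2 * d) = 0 then o.modify i (fun row => row.set j v1)
              else if PySem.Int.mod ((i : Int) - r1) (2 * d) = d then o.modify i (fun row => row.set j v2)
              else o
            else o) = (fun o j => o.modify i (fun row => row.set j v1)) := by
          funext o' j
          rw [if_pos h1, if_pos h2]
        rw [e, if_pos (And.intro h1 h2), foldl_modify_comm]
      · by_cases h3 : PySem.Int.mod ((i : Int) - r1) (2 * d) = d
        · have e : (fun (o : List (List Int)) (j : Nat) =>
              if r1 ≤ (i : Int) then
                if PySem.Int.mod ((i : Int) - r1) (2 * d) = 0 then o.modify i (fun row => row.set j v1)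
                else if PySem.Int.mod ((i : Int) - r1) (2 * d) = d then o.modify i (fun row => row.set j v2)
                else o
              else o) = (fun o j => o.modify i (fun row => row.set j v2)) := by
            funext o' j
            rw [if_pos h1, if_neg h2, if_pos h3]
          rw [e, if_neg (fun h => h2 h.2), if_pos (And.intro h1 h3), foldl_modify_comm]
        · have e : (fun (o : List (List Int)) (j : Nat) =>
              if r1 ≤ (i : Int) then
                if PySem.Int.mod ((i : Int) - r1) (2 * d) = 0 then o.modify i (fun row => row.set j v1)
                else if PySem.Int.mod ((i : Int) - r1) (2 * d) = d then o.modify i (fun row => row.set j v2)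
                else o
              else o) = (fun (o : List (List Int)) (j : Nat) => o) := by
            funext o' j
            rw [if_pos h1, if_neg h2, if_neg h3]
          rw [e, if_neg (fun h => h2 h.2), if_neg (fun h => h3 h.2), List.foldl_fixed, modify_self_id]
    · have e : (fun (o : List (List Int)) (j : Nat) =>
          if r1 ≤ (i : Int) then
            if PySem.Int.mod ((i : Int) - r1) (2 * d) = 0 then o.modify i (fun row => row.set j v1)
            else if PySem.Int.mod ((i : Int) - r1) (2 * d) = d then o.modify i (fun row => row.set j v2)
            else o
          else o) = (fun (o : List (List Int)) (j : Nat) => o) := by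
        funext o' j
        rw [if_neg h1]
      rw [e, if_neg (fun h => h1 h.1), if_neg (fun h => h1 h.1), List.foldl_fixed, modify_self_id]
  rw [hstep, foldl_range_modify, mapIdx_replicate]
  apply List.map_congr_left
  intro i hi
  rw [List.mem_range] at hi
  rw [if_pos hi]
  split_ifs with h1 h2
  · exact fill_replicate Cn v1
  · exact fill_replicate Cn v2
  · rfl

theorem colBranch_eq (R Cn : Nat) (c1 v1 v2 d : Int) :
    (List.range R).foldl (fun o (i : Nat) =>
      (List.range Cn).foldl (fun (o : List (List Int)) (j : Nat) =>
        if c1 ≤ (j : Int) then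
          if PySem.Int.mod ((j : Int) - c1) (2 * d) = 0 then o.modify i (fun row => row.set j v1)
          else if PySem.Int.mod ((j : Int) - c1) (2 * d) = d then o.modify i (fun row => row.set j v2)
          else o
        else o) o) (List.replicate R (List.replicate Cn (0 : Int)))
      = List.replicate R ((List.range Cn).map (fun (j : Nat) =>
          if c1 ≤ (j : Int) ∧ PySem.Int.mod ((j : Int) - c1) (2 * d) = 0 then v1
          else if c1 ≤ (j : Int) ∧ PySem.Int.mod ((j : Int) - c1) (2 * d) = d then v2
          else (0 : Int))) := by
  have e2 : (fun (r : List Int) (j : Nat) =>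
      (if c1 ≤ (j : Int) ∧ PySem.Int.mod ((j : Int) - c1) (2 * d) = 0 then
        (fun (row : List Int) => row.set j v1)
      else if c1 ≤ (j : Int) ∧ PySem.Int.mod ((j : Int) - c1) (2 * d) = d then
        (fun (row : List Int) => row.set j v2)
      else (fun row => row)) r)
      = (fun (r : List Int) (j : Nat) =>
          if c1 ≤ (j : Int) ∧ PySem.Int.mod ((j : Int) - c1) (2 * d) = 0 then r.set j v1
          else if c1 ≤ (j : Int) ∧ PySem.Int.mod ((j : Int) - c1) (2 * d) = d then r.set j v2
          else r) := by
    funext r j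
    split_ifs <;> rfl
  have hstep : (fun (o : List (List Int)) (i : Nat) =>
      (List.range Cn).foldl (fun (o : List (List Int)) (j : Nat) =>
        if c1 ≤ (j : Int) then
          if PySem.Int.mod ((j : Int) - c1) (2 * d) = 0 then o.modify i (fun row => row.set j v1)
          else if PySem.Int.mod ((j : Int) - c1) (2 * d) = d then o.modify i (fun row => row.set j v2)
          else o
        else o) o)
      = (fun o i => o.modify i (fun r =>
          (List.range Cn).foldl (fun (r : List Int) (j : Nat) =>
            if c1 ≤ (j : Int) ∧ PySem.Int.mod ((j : Int) - c1) (2 * d) = 0 then r.set j v1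
            else if c1 ≤ (j : Int) ∧ PySem.Int.mod ((j : Int) - c1) (2 * d) = d then r.set j v2
            else r) r)) := by
    funext o i
    have e : (fun (o : List (List Int)) (j : Nat) =>
        if c1 ≤ (j : Int) then
          if PySem.Int.mod ((j : Int) - c1) (2 * d) = 0 then o.modify i (fun row => row.set j v1)
          else if PySem.Int.mod ((j : Int) - c1) (2 * d) = d then o.modify i (fun row => row.set j v2)
          else o
        else o)
        = (fun (o : List (List Int)) (j : Nat) => o.modify i
            (if c1 ≤ (j : Int) ∧ PySem.Int.mod ((j : Int) - c1) (2 * d) = 0 then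
              (fun (row : List Int) => row.set j v1)
            else if c1 ≤ (j : Int) ∧ PySem.Int.mod ((j : Int) - c1) (2 * d) = d then
              (fun (row : List Int) => row.set j v2)
            else (fun row => row))) := by
      funext o' j
      split_ifs <;> first | rfl | tauto | exact (modify_self_id _ _).symm
    rw [e, foldl_modify_comm]
    congr 1
    funext r
    rw [e2]
  rw [hstep, foldl_range_modify, mapIdx_replicate]
  apply List.ext_getElem (by simp)
  intro t h1 h2
  simp only [List.getElem_map, List.getElem_range, List.getElem_replicate]
  rw [if_pos (by simpa using h1)]
  rw [foldl_range_set_ite2, mapIdx_replicate]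
  apply List.map_congr_left
  intro j hj
  rw [List.mem_range] at hj
  rw [if_pos hj]

-- ---- B-side: nextNZ / row-major triples correspondence ----
def nzT (C : Nat) : List Int → Nat → List (Int × Int × Int)
  | [], _ => []
  | v :: vs, f =>
    (if v ≠ 0 then [(((f / C : Nat) : Int), ((f % C : Nat) : Int), v)] else []) ++ nzT C vs (f + 1)

theorem nzT_append (C : Nat) :
    ∀ (l1 l2 : List Int) (f : Nat), nzT C (l1 ++ l2) f = nzT C l1 f ++ nzT C l2 (f + l1.length) := by
  intro l1
  induction l1 with
  | nil => intro l2 f; simp [nzT]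
  | cons v vs ih =>
    intro l2 f
    rw [List.cons_append, nzT, nzT, ih, List.length_cons, List.append_assoc,
      show f + (vs.length + 1) = f + 1 + vs.length from by omega]

theorem nzT_filter_map (C : Nat) :
    ∀ (l : List Int) (f0 : Nat),
      nzT C l f0 = ((List.range l.length).filter (fun t => l.getD t 0 != 0)).map
        (fun (t : Nat) => ((((f0 + t) / C : Nat) : Int), (((f0 + t) % C : Nat) : Int), l.getD t 0)) := by
  intro l
  induction l with
  | nil => intro f0; simp [nzT]
  | cons v vs ih =>
    intro f0
    rw [nzT, ih (f0 + 1), List.length_cons, List.range_succ_eq_map, List.filter_cons,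
      List.filter_map]
    rw [show ((fun t => (v :: vs).getD t 0 != 0) ∘ Nat.succ) = (fun t => vs.getD t 0 != 0)
      from by funext t; simp]
    rw [List.getD_cons_zero]
    by_cases hv : v = 0
    · rw [if_neg (show ¬ v ≠ 0 from by simp [hv]),
        if_neg (show ¬ ((v != 0) = true) from by simp [hv]), List.nil_append, List.map_map]
      apply List.map_congr_left
      intro t ht
      have h3 : f0 + 1 + t = f0 + (t + 1) := by omega
      simp [Function.comp_apply, h3]
    · rw [if_pos (show v ≠ 0 from hv), if_pos (show (v != 0) = true from by simpa using hv),
        List.map_cons, List.map_map, List.singleton_append]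
      rw [List.cons_eq_cons]
      refine ⟨by simp, ?_⟩
      apply List.map_congr_left
      intro t ht
      simp only [Function.comp_apply, Nat.succ_eq_add_one, List.getD_cons_succ]
      rw [show f0 + (t + 1) = f0 + 1 + t from by omega]

theorem rowCellsB_eq_nzT (C i : Nat) (row : List Int) (h : C ≤ row.length) :
    rowCellsB C i row = nzT C (row.take C) (i * C) := by
  rw [rowCellsB_eq, nzT_filter_map]
  have hlen : (row.take C).length = C := by simp [Nat.min_eq_left h]
  rw [hlen]
  have hget : ∀ t, t < C → (row.take C).getD t 0 = row.getD t 0 := by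
    intro t ht
    rw [List.getD_eq_getElem?_getD, List.getD_eq_getElem?_getD, List.getElem?_take]
    simp [ht]
  have hfil : List.filter (fun t => (row.take C).getD t 0 != 0) (List.range C)
      = List.filter (fun t => row.getD t 0 != 0) (List.range C) := by
    apply List.filter_congr
    intro t ht
    rw [List.mem_range] at ht
    rw [hget t ht]
  rw [hfil]
  apply List.map_congr_left
  intro t ht
  rw [List.mem_filter, List.mem_range] at ht
  have ht' := ht.1
  have hC : 0 < C := by omega
  have hdiv : (i * C + t) / C = i := by
    rw [Nat.mul_comm i C, Nat.mul_add_div hC, Nat.div_eq_of_lt ht', Nat.add_zero]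
  have hmod : (i * C + t) % C = t := by
    rw [Nat.mul_comm i C, Nat.mul_add_mod]
    exact Nat.mod_eq_of_lt ht'
  rw [hdiv, hmod, hget t ht']

def flatOf (C : Nat) (g : List (List Int)) : List Int := g.flatMap (fun row => row.take C)

theorem flatCells_eq_nzT (C : Nat) :
    ∀ (g : List (List Int)) (s : Nat), (∀ r ∈ g, C ≤ r.length) →
      flatCells C g s = nzT C (flatOf C g) (s * C) := by
  intro g
  induction g with
  | nil => intro s h; simp [flatCells, flatOf, nzT]
  | cons r rs ih =>
    intro s h
    have hr : C ≤ r.length := h r (List.mem_cons_self ..)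
    rw [flatCells, flatOf, List.flatMap_cons, nzT_append,
      rowCellsB_eq_nzT C s r hr,
      show (rs.flatMap (fun row => row.take C)) = flatOf C rs from rfl,
      ih (s + 1) (fun x hx => h x (List.mem_cons_of_mem _ hx)),
      show (List.take C r).length = C from by simp [Nat.min_eq_left hr],
      show (s + 1) * C = s * C + C from by ring]

theorem length_nzT (C : Nat) :
    ∀ (l : List Int) (f : Nat), (nzT C l f).length = l.countP (fun v => v ≠ 0) := by
  intro l
  induction l with
  | nil => intro f; simp [nzT]
  | cons v vs ih =>
    intro f
    rw [nzT, List.length_append, ih, List.countP_cons]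
    by_cases hv : v ≠ 0 <;> simp [hv, Nat.add_comm]

theorem nextNZ_ge : ∀ (l : List Int) (f0 f : Nat) (v : Int),
    nextNZ l f0 = some (f, v) → f0 ≤ f ∧ f < f0 + l.length := by
  intro l
  induction l with
  | nil => intro f0 f v h; simp [nextNZ] at h
  | cons x xs ih =>
    intro f0 f v h
    rw [nextNZ] at h
    by_cases hx : x ≠ 0
    · rw [if_pos hx] at h
      cases h
      simp
    · rw [if_neg hx] at h
      have := ih (f0 + 1) f v h
      simp only [List.length_cons]
      omega

theorem nzT_head (C : Nat) :
    ∀ (l : List Int) (f0 : Nat),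
      nzT C l f0 = match nextNZ l f0 with
        | none => []
        | some (f, v) => (((f / C : Nat) : Int), ((f % C : Nat) : Int), v) :: nzT C (l.drop (f + 1 - f0)) (f + 1) := by
  intro l
  induction l with
  | nil => intro f0; simp [nzT, nextNZ]
  | cons x xs ih =>
    intro f0
    rw [nzT, nextNZ]
    by_cases hx : x ≠ 0
    · rw [if_pos hx, if_pos hx]
      simp only []
      have : f0 + 1 - f0 = 1 := by omega
      rw [this, List.drop_one, List.tail_cons, List.singleton_append]
    · rw [if_neg hx, if_neg hx, List.nil_append, ih (f0 + 1)]
      cases hnz : nextNZ xs (f0 + 1) with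
      | none => rfl
      | some p =>
        obtain ⟨f, v⟩ := p
        have hge := (nextNZ_ge xs (f0 + 1) f v hnz).1
        simp only []
        congr 1
        have h1 : f + 1 - f0 = (f + 1 - (f0 + 1)) + 1 := by omega
        rw [h1, List.drop_succ_cons]

-- ---- tiling lemmas ----
theorem getElem_flatten_replicate {α : Type} :
    ∀ (k : Nat) (b : List α) (m : Nat) (h : m < ((List.replicate k b).flatten).length),
      ((List.replicate k b).flatten)[m] = b[m % b.length]'(by
        rw [List.length_flatten] at h
        have hb : b.length ≠ 0 := by
          rcases Nat.eq_zero_or_pos b.length with h0 | h0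
          · exfalso
            simp [h0] at h
          · omega
        exact Nat.mod_lt _ (by omega)) := by
  intro k
  induction k with
  | zero => intro b m h; simp at h
  | succ k ih =>
    intro b m h
    have hflat : (List.replicate (k + 1) b).flatten = b ++ (List.replicate k b).flatten := by
      rw [List.replicate_succ, List.flatten_cons]
    rw [List.getElem_of_eq hflat]
    by_cases hm : m < b.length
    · rw [List.getElem_append_left hm]
      congr 1
      exact (Nat.mod_eq_of_lt hm).symm
    · push_neg at hm
      have hlen : m - b.length < ((List.replicate k b).flatten).length := by
        rw [hflat, List.length_append] at h
        omega
      rw [List.getElem_append_right hm]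
      rw [ih b (m - b.length) hlen]
      congr 1
      have hb : 0 < b.length := by
        rcases Nat.eq_zero_or_pos b.length with h0 | h0
        · exfalso
          rw [List.length_flatten] at hlen
          simp [h0] at hlen
        · exact h0
      conv_rhs => rw [show m = (m - b.length) + 1 * b.length by omega]
      rw [Nat.add_mul_mod_self_right]

theorem block_getElem {α : Type} (a b z : α) (d u : Nat) (hd : 1 ≤ d) (hu : u < 2 * d)
    (hlen : u < ([a] ++ List.replicate (d - 1) z ++ [b] ++ List.replicate (d - 1) z).length) :
    ([a] ++ List.replicate (d - 1) z ++ [b] ++ List.replicate (d - 1) z)[u]'hlen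
      = if u = 0 then a else if u = d then b else z := by
  simp only [List.getElem_append, List.length_append, List.length_replicate,
    List.length_cons, List.length_nil, List.getElem_replicate]
  split_ifs <;> first | rfl | omega | (simp_all; omega) | simp_all

theorem tile {α : Type} (d n : Nat) (hd : 1 ≤ d) (a b z : α) :
    ((List.replicate ((n + 2 * d - 1) / (2 * d)) ([a] ++ List.replicate (d - 1) z ++ [b] ++ List.replicate (d - 1) z)).flatten).take n
      = (List.range n).map (fun t => if t % (2 * d) = 0 then a else if t % (2 * d) = d then b else z) := by
  have hblen : ([a] ++ List.replicate (d - 1) z ++ [b] ++ List.replicate (d - 1) z).length = 2 * d := by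
    simp
    omega
  have hge : n ≤ ((n + 2 * d - 1) / (2 * d)) * (2 * d) := by
    have h1 := Nat.div_add_mod (n + 2 * d - 1) (2 * d)
    have h2 : (n + 2 * d - 1) % (2 * d) < 2 * d := Nat.mod_lt _ (by omega)
    rw [Nat.mul_comm]
    generalize hP : 2 * d * ((n + 2 * d - 1) / (2 * d)) = P at h1 ⊢
    omega
  have hflen : ((List.replicate ((n + 2 * d - 1) / (2 * d)) ([a] ++ List.replicate (d - 1) z ++ [b] ++ List.replicate (d - 1) z)).flatten).length
      = ((n + 2 * d - 1) / (2 * d)) * (2 * d) := by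
    rw [List.length_flatten, List.map_replicate, List.sum_replicate, smul_eq_mul, hblen,
      Nat.mul_comm]
  apply List.ext_getElem
  · rw [List.length_take, hflen, List.length_map, List.length_range]
    omega
  · intro m h1 h2
    rw [List.getElem_take, getElem_flatten_replicate, List.getElem_map, List.getElem_range]
    have hmlt : m % ([a] ++ List.replicate (d - 1) z ++ [b] ++ List.replicate (d - 1) z).length
        < ([a] ++ List.replicate (d - 1) z ++ [b] ++ List.replicate (d - 1) z).length := by
      rw [hblen]
      exact Nat.mod_lt _ (by omega)
    rw [block_getElem a b z d _ hd (by rw [← hblen]; exact hmlt)]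
    rw [hblen]

-- ---- Python mod characterization ----
theorem pymod_iffs (t : Nat) (e : Int) (he : e ≠ 0) :
    (PySem.Int.mod (t : Int) (2 * e) = 0 ↔ t % (2 * e.natAbs) = 0) ∧
    (PySem.Int.mod (t : Int) (2 * e) = e ↔ t % (2 * e.natAbs) = e.natAbs) := by
  have ha : 1 ≤ e.natAbs := by omega
  have hs := Nat.div_add_mod t (2 * e.natAbs)
  have hslt : t % (2 * e.natAbs) < 2 * e.natAbs := Nat.mod_lt _ (by omega)
  rcases lt_or_gt_of_ne he with hneg | hpos
  · -- e < 0 : use the floor-division identity and divisor-sign bounds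
    have he' : e = -(e.natAbs : Int) := by omega
    have heq := PySem.Int.floordiv_mul_add_mod (t : Int) (2 * e)
    have hb := PySem.Int.mod_neg_bounds (a := (t : Int)) (b := 2 * e) (by omega)
    set a : Nat := e.natAbs with haa
    set r : Int := PySem.Int.mod (t : Int) (2 * e) with hr
    set q : Int := PySem.Int.floordiv (t : Int) (2 * e) with hq
    have hsc : (2 * (a : Int)) * ((t / (2 * a) : Nat) : Int) + ((t % (2 * a) : Nat) : Int) = (t : Int) := by
      exact_mod_cast hs
    have hk : r - ((t % (2 * a) : Nat) : Int)
        = 2 * (a : Int) * (((t / (2 * a) : Nat) : Int) + q) := by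
      rw [he'] at heq
      linear_combination heq - hsc
    set k : Int := ((t / (2 * a) : Nat) : Int) + q with hkk
    have hbnd1 : 2 * e < r := hb.1
    have hbnd2 : r ≤ 0 := hb.2
    have hk1 : k ≤ 0 := by
      by_contra hcon
      push_neg at hcon
      have h1 : (1 : Int) ≤ k := hcon
      have h2 : 2 * (a : Int) ≤ 2 * (a : Int) * k :=
        le_mul_of_one_le_right (by positivity) h1
      omega
    have hk2 : -1 ≤ k := by
      by_contra hcon
      push_neg at hcon
      have h1 : k ≤ -2 := by omega
      have h2 : 2 * (a : Int) * k ≤ 2 * (a : Int) * (-2) :=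
        mul_le_mul_of_nonneg_left h1 (by positivity)
      omega
    have hk01 : k = 0 ∨ k = -1 := by omega
    rcases hk01 with hk0 | hkm
    · rw [hk0, mul_zero] at hk
      constructor <;> constructor <;> intro h <;> omega
    · rw [hkm] at hk
      have : r - ((t % (2 * a) : Nat) : Int) = -(2 * (a : Int)) := by linarith [hk]
      constructor <;> constructor <;> intro h <;> omega
  · -- e > 0 : Python mod is Euclidean mod, which is Nat mod on casts
    have he' : e = (e.natAbs : Int) := by omega
    rw [PySem.Int.mod_eq_emod_of_pos (by omega)]
    rw [he']
    have hcast : ((2 : Int) * (e.natAbs : Int)) = ((2 * e.natAbs : Nat) : Int) := by push_cast; ring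
    rw [hcast, ← Int.natCast_mod]
    constructor
    · exact ⟨fun h => by exact_mod_cast h, fun h => by exact_mod_cast h⟩
    · exact ⟨fun h => by exact_mod_cast h, fun h => by exact_mod_cast h⟩

theorem pymod_zero_iff (t : Nat) (e : Int) (he : e ≠ 0) :
    PySem.Int.mod (t : Int) (2 * e) = 0 ↔ t % (2 * e.natAbs) = 0 :=
  (pymod_iffs t e he).1

theorem pymod_mid_iff (t : Nat) (e : Int) (he : e ≠ 0) :
    PySem.Int.mod (t : Int) (2 * e) = e ↔ t % (2 * e.natAbs) = e.natAbs :=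
  (pymod_iffs t e he).2
-- ---- the stripe lemma: A's per-index modulo map = B's tiled construction ----
theorem stripe {α : Type} (N x1 : Nat) (e : Int) (he : e ≠ 0) (hx : x1 ≤ N) (a b z : α) :
    (List.range N).map (fun (i : Nat) =>
        if ((x1 : Nat) : Int) ≤ ((i : Nat) : Int) ∧ PySem.Int.mod (((i : Nat) : Int) - ((x1 : Nat) : Int)) (2 * e) = 0 then a
        else if ((x1 : Nat) : Int) ≤ ((i : Nat) : Int) ∧ PySem.Int.mod (((i : Nat) : Int) - ((x1 : Nat) : Int)) (2 * e) = e then b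
        else z)
      = List.replicate x1 z ++
        ((List.replicate ((N - x1 + 2 * e.natAbs - 1) / (2 * e.natAbs))
            ([a] ++ List.replicate (e.natAbs - 1) z ++ [b] ++ List.replicate (e.natAbs - 1) z)).flatten.take (N - x1)) := by
  have ha : 1 ≤ e.natAbs := by omega
  obtain ⟨n, rfl⟩ : ∃ n, N = x1 + n := ⟨N - x1, by omega⟩
  rw [show x1 + n - x1 = n from by omega]
  rw [List.range_add, List.map_append, List.map_map]
  congr 1
  · apply List.eq_replicate_iff.mpr
    refine ⟨by simp, ?_⟩
    intro y hy
    rw [List.mem_map] at hy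
    obtain ⟨i, hi, rfl⟩ := hy
    rw [List.mem_range] at hi
    have h1 : ¬ (((x1 : Nat) : Int) ≤ ((i : Nat) : Int)) := by
      push_cast
      omega
    rw [if_neg (fun h => h1 h.1), if_neg (fun h => h1 h.1)]
  · rw [tile e.natAbs n ha a b z]
    apply List.map_congr_left
    intro t ht
    simp only [Function.comp_apply]
    have h1 : ((x1 : Nat) : Int) ≤ ((x1 + t : Nat) : Int) := by
      push_cast
      omega
    have h2 : ((x1 + t : Nat) : Int) - ((x1 : Nat) : Int) = ((t : Nat) : Int) := by
      push_cast
      ring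
    rw [h2]
    rw [if_congr (and_iff_right h1) rfl rfl, if_congr (and_iff_right h1) rfl rfl]
    rw [if_congr (pymod_zero_iff t e he) rfl rfl, if_congr (pymod_mid_iff t e he) rfl rfl]

-- ---- main assembly ----
theorem flatOf_length (C : Nat) :
    ∀ (g : List (List Int)), (∀ r ∈ g, C ≤ r.length) → (flatOf C g).length = g.length * C := by
  intro g
  induction g with
  | nil => intro h; simp [flatOf]
  | cons r rs ih =>
    intro h
    have hr : C ≤ r.length := h r (List.mem_cons_self ..)
    rw [flatOf, List.flatMap_cons, List.length_append, List.length_take,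
      Nat.min_eq_left hr]
    rw [show (rs.flatMap (fun row => row.take C)) = flatOf C rs from rfl,
      ih (fun x hx => h x (List.mem_cons_of_mem _ hx))]
    simp [Nat.succ_mul]
    ring

theorem solve_eq_alt (g : List (List Int)) (hpre : Pre_solve g) : solve g = solve_alt g := by
  obtain ⟨hne, hrows, hcnt⟩ := hpre
  have hC0 : 0 < (g.headD []).length := by
    rcases Nat.eq_zero_or_pos (g.headD []).length with h0 | h0
    · exfalso
      have hnil : (g.flatMap (fun r => r.take (g.headD []).length)) = [] := by
        rw [h0]
        simp
      rw [hnil] at hcnt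
      simp at hcnt
    · exact h0
  have hcnt' : 2 ≤ (nzT (g.headD []).length (flatOf (g.headD []).length g) 0).length := by
    rw [length_nzT]
    exact hcnt
  obtain ⟨f1, v1, hnz1⟩ : ∃ f v, nextNZ (flatOf (g.headD []).length g) 0 = some (f, v) := by
    cases hh : nextNZ (flatOf (g.headD []).length g) 0 with
    | none =>
      exfalso
      have hsh := nzT_head (g.headD []).length (flatOf (g.headD []).length g) 0
      rw [hh] at hsh
      rw [hsh] at hcnt'
      simp at hcnt'
    | some p =>
      obtain ⟨f, v⟩ := p
      exact ⟨f, v, rfl⟩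
  have hshape1 := nzT_head (g.headD []).length (flatOf (g.headD []).length g) 0
  rw [hnz1] at hshape1
  simp only [Nat.sub_zero] at hshape1
  obtain ⟨f2, v2, hnz2⟩ :
      ∃ f v, nextNZ ((flatOf (g.headD []).length g).drop (f1 + 1)) (f1 + 1) = some (f, v) := by
    cases hh : nextNZ ((flatOf (g.headD []).length g).drop (f1 + 1)) (f1 + 1) with
    | none =>
      exfalso
      have hsh2 := nzT_head (g.headD []).length ((flatOf (g.headD []).length g).drop (f1 + 1)) (f1 + 1)
      rw [hh] at hsh2
      rw [hshape1, hsh2] at hcnt'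
      simp at hcnt'
    | some p =>
      obtain ⟨f, v⟩ := p
      exact ⟨f, v, rfl⟩
  have hshape2 := nzT_head (g.headD []).length ((flatOf (g.headD []).length g).drop (f1 + 1)) (f1 + 1)
  rw [hnz2] at hshape2
  have hb1 := nextNZ_ge _ 0 f1 v1 hnz1
  have hb2 := nextNZ_ge _ (f1 + 1) f2 v2 hnz2
  have hflatlen : (flatOf (g.headD []).length g).length = g.length * (g.headD []).length :=
    flatOf_length _ g hrows
  have hf1L : f1 < (flatOf (g.headD []).length g).length := by
    have := hb1.2
    omega
  have hf2L : f2 < (flatOf (g.headD []).length g).length := by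
    have h := hb2.2
    rw [List.length_drop] at h
    omega
  have hf12 : f1 < f2 := by
    have := hb2.1
    omega
  have hf1' : f1 < g.length * (g.headD []).length := by
    rw [hflatlen] at hf1L
    exact hf1L
  have hr1R : f1 / (g.headD []).length < g.length :=
    (Nat.div_lt_iff_lt_mul hC0).mpr hf1'
  -- unfold both ports
  simp only [solve, solve_alt]
  rw [show PySem.List.pyGetD g 0 ([] : List Int) = g.headD [] from by
    cases g <;> simp [PySem.List.pyGetD, PySem.List.pyGet?, PySem.List.pyIdx?]]
  rw [solveA_M0 g ((g.headD []).length)]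
  rw [PySem.List.sorted_eq_self_of_pairwise _ _
    ((pairwise_flatCells ((g.headD []).length) g 0).imp (fun h => le_of_lt h))]
  rw [flatCells_eq_nzT _ g 0 hrows, Nat.zero_mul]
  rw [show (g.flatMap fun row => row.take (g.headD []).length) = flatOf (g.headD []).length g
    from rfl]
  rw [hshape1, hshape2, hnz1]
  simp only [PySem.List.pyGetD_ofNat', List.getD_cons_zero, List.getD_cons_succ,
    Option.getD_some]
  rw [hnz2]
  simp only [Option.getD_some]
  split_ifs with hbr
  · -- row branch
    have hq : f1 / (g.headD []).length < f2 / (g.headD []).length := by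
      rcases hbr with h | h
      · have hrem : f1 % (g.headD []).length = f2 % (g.headD []).length := by exact_mod_cast h
        have hle : f1 / (g.headD []).length ≤ f2 / (g.headD []).length :=
          Nat.div_le_div_right (le_of_lt hf12)
        rcases Nat.lt_or_ge (f1 / (g.headD []).length) (f2 / (g.headD []).length) with h' | h'
        · exact h'
        · exfalso
          have heqd : f1 / (g.headD []).length = f2 / (g.headD []).length :=
            Nat.le_antisymm hle h'
          have : f1 = f2 := by
            rw [← Nat.div_add_mod f1 (g.headD []).length, ← Nat.div_add_mod f2 (g.headD []).length,
              heqd, hrem]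
          omega
      · have h1 := h.1
        have : ((f1 / (g.headD []).length : Nat) : Int) < ((f2 / (g.headD []).length : Nat) : Int) := by
          omega
        exact_mod_cast this
    have he : ((f2 / (g.headD []).length : Nat) : Int) - ((f1 / (g.headD []).length : Nat) : Int) ≠ 0 := by
      omega
    rw [PySem.List.pyRange_zero_natCast g.length,
      PySem.List.pyRange_zero_natCast ((g.headD []).length)]
    simp only [List.foldl_map, Int.toNat_natCast]
    rw [rowBranch_eq g.length ((g.headD []).length) _ _ _ _]
    rw [stripe g.length (f1 / (g.headD []).length) _ he (le_of_lt hr1R) _ _ _]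
    rw [show (((f2 / (g.headD []).length : Nat) : Int) - ((f1 / (g.headD []).length : Nat) : Int)).natAbs
      = f2 / (g.headD []).length - f1 / (g.headD []).length from by omega]
  · -- column branch
    have hcc : ((f1 % (g.headD []).length : Nat) : Int) ≠ ((f2 % (g.headD []).length : Nat) : Int) := by
      intro h
      exact hbr (Or.inl h)
    have he : ((f2 % (g.headD []).length : Nat) : Int) - ((f1 % (g.headD []).length : Nat) : Int) ≠ 0 := by
      omega
    have hc1C : f1 % (g.headD []).length < (g.headD []).length := Nat.mod_lt _ hC0
    rw [PySem.List.pyRange_zero_natCast g.length,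
      PySem.List.pyRange_zero_natCast ((g.headD []).length)]
    simp only [List.foldl_map, Int.toNat_natCast]
    rw [colBranch_eq g.length ((g.headD []).length) _ _ _ _]
    congr 1
    rw [stripe ((g.headD []).length) (f1 % (g.headD []).length) _ he (le_of_lt hc1C) _ _ _]

-- ===== VERDICT (by name: the statement is the Claim_ definition above) =====
theorem solve_spec : Claim_equal_solve := by
  intro g _ hpre
  exact solve_eq_alt g hpre
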